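-- pv_equiv track=rewrite | github.com/sdouf5054/ai-lec-programming-assignment | omok.py | check_connection
-- ===== SOURCE A (Python) =====
-- BLACK = 0
--
-- WHITE = 1
--
-- player = 0
--
-- def check_connection(player, connection_list):
--     cur_player = player
--     score = 0
--
--     if cur_player == BLACK:
--         for connected_pair, opened in connection_list[BLACK]:
--             if len(opened) == 0 and len(connected_pair) < 5:
--                 continue
--             elif len(connected_pair) == 2:
--                 if len(opened) == 2:
--                     score += 20
--                 else: score +=5
--             elif len(connected_pair) == 3:
--                 if len(opened) == 2:
--                     score += 100
--                 else: score +=10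
--             elif len(connected_pair) == 4:
--                 if len(opened) == 2:
--                     score += 7777
--                 else: score +=50
--             elif len(connected_pair) == 5:
--                 score += 999999999
--             else:
--               continue
--
--     else:
--         for connected_pair, opened in connection_list[WHITE]:
--             if len(opened) == 0 and len(connected_pair) < 5:
--                 continue
--             elif len(connected_pair) == 2:
--                 if len(opened) == 2:
--                     score -= 20
--                 else: score -=5
--             elif len(connected_pair) == 3:
--                 if len(opened) == 2:
--                     score -= 100
--                 else: score -=10
--             elif len(connected_pair) == 4:
--                 if len(opened) == 2:
--                     score -= 7777
--                 else: score -=50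
--             elif len(connected_pair) == 5:
--                 score -= 999999999
--             else:
--               continue
--
--     return score
-- ===== SOURCE B (Python) =====
-- BLACK = 0
--
-- WHITE = 1
--
-- def _weight(pair_len, open_len):
--     if open_len == 0 and pair_len < 5:
--         return 0
--     if pair_len == 2:
--         return 20 if open_len == 2 else 5
--     if pair_len == 3:
--         return 100 if open_len == 2 else 10
--     if pair_len == 4:
--         return 7777 if open_len == 2 else 50
--     if pair_len == 5:
--         return 999999999
--     return 0
--
-- def check_connection(player, connection_list):
--     # Stage 1: aggregate the row into a histogram keyed by (pair length, opened count).
--     row = connection_list[BLACK] if player == BLACK else connection_list[WHITE]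
--     hist = {}
--     for connected_pair, opened in row:
--         key = (len(connected_pair), len(opened))
--         hist[key] = hist.get(key, 0) + 1
--     # Stage 2: weighted sum over the distinct classes, sign applied once at the end.
--     total = sum(_weight(pl, op) * cnt for (pl, op), cnt in hist.items())
--     return total if player == BLACK else -total
-- ===== Notes on version B (the rewrite author's own statement) =====
-- stated objective: alternative
-- what changed: B aggregates the row into a histogram keyed by (pair length, opened count) and then computes one weighted sum over the distinct classes with the sign applied once at the end, instead of A's two mirrored per-item if-elif accumulation loops.
import Mathlib
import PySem

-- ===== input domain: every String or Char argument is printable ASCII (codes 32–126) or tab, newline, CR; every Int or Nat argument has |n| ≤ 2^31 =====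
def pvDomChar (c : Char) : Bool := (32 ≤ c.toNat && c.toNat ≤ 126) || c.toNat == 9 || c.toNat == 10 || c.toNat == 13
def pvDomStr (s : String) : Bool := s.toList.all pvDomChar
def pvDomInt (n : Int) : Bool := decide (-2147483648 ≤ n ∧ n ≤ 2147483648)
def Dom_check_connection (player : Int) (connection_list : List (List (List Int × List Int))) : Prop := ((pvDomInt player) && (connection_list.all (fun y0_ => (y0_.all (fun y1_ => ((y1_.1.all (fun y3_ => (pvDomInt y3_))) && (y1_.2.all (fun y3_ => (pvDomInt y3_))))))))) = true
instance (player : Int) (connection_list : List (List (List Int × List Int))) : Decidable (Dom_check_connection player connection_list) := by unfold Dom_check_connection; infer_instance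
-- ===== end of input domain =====

-- B replaces A's two mirrored per-item if-elif loops by a histogram of (pair length, opened
-- count) classes followed by one weighted sum with the sign applied once (objective: alternative).

-- ===== PORT A =====
def check_connection (player : Int) (connection_list : List (List (List Int × List Int))) : Int :=
  let cur_player := player
  if cur_player == 0 then
    match PySem.List.pyGet? connection_list 0 with
    | none => 0   -- IndexError in Python; excluded by Pre_
    | some row =>
      row.foldl (fun score p =>
        let connected_pair := p.1
        let opened := p.2
        if opened.length == 0 && decide (connected_pair.length < 5) then score
        else if connected_pair.length == 2 then
          (if opened.length == 2 then score + 20 else score + 5)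
        else if connected_pair.length == 3 then
          (if opened.length == 2 then score + 100 else score + 10)
        else if connected_pair.length == 4 then
          (if opened.length == 2 then score + 7777 else score + 50)
        else if connected_pair.length == 5 then score + 999999999
        else score) 0
  else
    match PySem.List.pyGet? connection_list 1 with
    | none => 0   -- IndexError in Python; excluded by Pre_
    | some row =>
      row.foldl (fun score p =>
        let connected_pair := p.1
        let opened := p.2
        if opened.length == 0 && decide (connected_pair.length < 5) then score
        else if connected_pair.length == 2 then
          (if opened.length == 2 then score - 20 else score - 5)
        else if connected_pair.length == 3 then
          (if opened.length == 2 then score - 100 else score - 10)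
        else if connected_pair.length == 4 then
          (if opened.length == 2 then score - 7777 else score - 50)
        else if connected_pair.length == 5 then score - 999999999
        else score) 0

-- ===== PORT B =====
-- _weight(pair_len, open_len) from Source B
def pvWeight (pl op : Int) : Int :=
  if op == 0 && decide (pl < 5) then 0
  else if pl == 2 then (if op == 2 then 20 else 5)
  else if pl == 3 then (if op == 2 then 100 else 10)
  else if pl == 4 then (if op == 2 then 7777 else 50)
  else if pl == 5 then 999999999
  else 0

def check_connection_alt (player : Int) (connection_list : List (List (List Int × List Int))) : Int :=
  match PySem.List.pyGet? connection_list (if player == 0 then 0 else 1) with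
  | none => 0   -- IndexError in Python; excluded by Pre_
  | some row =>
    -- Stage 1: histogram keyed by (pair length, opened count)
    let hist : PySem.Dict (Int × Int) Int :=
      row.foldl (fun d p =>
        let key : Int × Int := ((p.1.length : Int), (p.2.length : Int))
        d.insert key (d.getD key 0 + 1)) PySem.Dict.empty
    -- Stage 2: weighted sum over the distinct classes
    let total := (hist.items.map (fun kv => pvWeight kv.1.1 kv.1.2 * kv.2)).sum
    if player == 0 then total else -total

-- ===== PRECONDITION & SPEC =====
-- Pre_ excludes exactly the inputs where Python A raises IndexError: connection_list must
-- have an entry at index 0 (player == BLACK) resp. index 1 (otherwise).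
def Pre_check_connection (player : Int) (connection_list : List (List (List Int × List Int))) : Prop :=
  if player = 0 then 1 ≤ connection_list.length else 2 ≤ connection_list.length
instance (player : Int) (connection_list : List (List (List Int × List Int))) : Decidable (Pre_check_connection player connection_list) := by unfold Pre_check_connection; infer_instance
def pvWitness_check_connection : Int × (List (List (List Int × List Int))) :=
  (0, [[([1, 2], [3, 4])], []])

def Spec_check_connection (player : Int) (connection_list : List (List (List Int × List Int))) (out : Int) : Prop := out = check_connection_alt player connection_list
instance (player : Int) (connection_list : List (List (List Int × List Int))) (out : Int) : Decidable (Spec_check_connection player connection_list out) := by unfold Spec_check_connection; infer_instance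

-- ===== CLAIM =====
def Claim_equal_check_connection : Prop := ∀ (player : Int) (connection_list : List (List (List Int × List Int))), Dom_check_connection player connection_list → Pre_check_connection player connection_list → Spec_check_connection player connection_list (check_connection player connection_list)

-- ===== LEMMAS AND PROOFS =====

-- the per-item contribution, as B's weight of the item's class
def pvItemW (p : List Int × List Int) : Int :=
  pvWeight (p.1.length : Int) (p.2.length : Int)

theorem pvItemW_cases (p : List Int × List Int) :
    pvItemW p =
      if p.2.length == 0 && decide (p.1.length < 5) then 0
      else if p.1.length == 2 then (if p.2.length == 2 then 20 else 5)
      else if p.1.length == 3 then (if p.2.length == 2 then 100 else 10)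
      else if p.1.length == 4 then (if p.2.length == 2 then 7777 else 50)
      else if p.1.length == 5 then 999999999
      else 0 := by
  obtain ⟨a, b⟩ := p
  simp only [pvItemW, pvWeight]
  have h0 : ((b.length : Int) == 0) = (b.length == 0) := by
    simp
  have h2' : ((b.length : Int) == 2) = (b.length == 2) := by
    simp; omega
  have hlt : (decide ((a.length : Int) < 5)) = (decide (a.length < 5)) := by
    simp
  rw [h0, h2', hlt]
  by_cases hg : (b.length == 0 && decide (a.length < 5)) = true
  · simp [hg]
  · simp only [hg, Bool.false_eq_true, if_false]
    by_cases e2 : a.length = 2 <;> by_cases e3 : a.length = 3 <;>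
      by_cases e4 : a.length = 4 <;> by_cases e5 : a.length = 5 <;>
      simp_all
    omega

theorem stepA_black (s : Int) (p : List Int × List Int) :
    (let connected_pair := p.1
     let opened := p.2
     if opened.length == 0 && decide (connected_pair.length < 5) then s
     else if connected_pair.length == 2 then (if opened.length == 2 then s + 20 else s + 5)
     else if connected_pair.length == 3 then (if opened.length == 2 then s + 100 else s + 10)
     else if connected_pair.length == 4 then (if opened.length == 2 then s + 7777 else s + 50)
     else if connected_pair.length == 5 then s + 999999999
     else s) = s + pvItemW p := by
  rw [pvItemW_cases]
  simp only []
  split_ifs <;> omega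

theorem stepA_white (s : Int) (p : List Int × List Int) :
    (let connected_pair := p.1
     let opened := p.2
     if opened.length == 0 && decide (connected_pair.length < 5) then s
     else if connected_pair.length == 2 then (if opened.length == 2 then s - 20 else s - 5)
     else if connected_pair.length == 3 then (if opened.length == 2 then s - 100 else s - 10)
     else if connected_pair.length == 4 then (if opened.length == 2 then s - 7777 else s - 50)
     else if connected_pair.length == 5 then s - 999999999
     else s) = s + (-pvItemW p) := by
  rw [pvItemW_cases]
  simp only []
  split_ifs <;> omega

-- List.count is the same under the derived and the product BEq instance on Int × Int
theorem count_inst_bridge (l : List (Int × Int)) (a : Int × Int) :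
    @List.count (Int × Int) instBEqOfDecidableEq a l = l.count a := by
  induction l with
  | nil => rfl
  | cons x t ih =>
    by_cases hxa : x = a <;> simp [ih, hxa]

-- summing a weight over the distinct classes times their multiplicity is summing it per item
theorem sum_ofList_count (l : List (Int × Int)) (f : Int × Int → Int) :
    ((PySem.Set.ofList l).map (fun k => f k * (l.count k : Int))).sum = (l.map f).sum := by
  classical
  rw [← List.sum_toFinset _ (PySem.Set.nodup_ofList (xs := l))]
  have hfs : (PySem.Set.ofList l).toFinset = l.toFinset := by
    ext x; simp [PySem.Set.mem_ofList]
  rw [hfs, Finset.sum_list_map_count]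
  apply Finset.sum_congr rfl
  intro m _
  rw [count_inst_bridge]
  simp [mul_comm]

-- B's value on a row equals the per-item sum
theorem alt_row (row : List (List Int × List Int)) :
    ((row.foldl (fun d p =>
        let key : Int × Int := ((p.1.length : Int), (p.2.length : Int))
        d.insert key (d.getD key 0 + 1)) PySem.Dict.empty).items.map
          (fun kv => pvWeight kv.1.1 kv.1.2 * kv.2)).sum
      = (row.map pvItemW).sum := by
  have h1 : (row.foldl (fun d p =>
        let key : Int × Int := ((p.1.length : Int), (p.2.length : Int))
        d.insert key (d.getD key 0 + 1)) PySem.Dict.empty)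
      = PySem.Dict.counter (row.map (fun p => ((p.1.length : Int), (p.2.length : Int)))) := by
    rw [← PySem.Dict.foldl_insert_getD_add_one_eq_counter, List.foldl_map]
  rw [h1, PySem.Dict.items_counter, List.map_map]
  have h3 : ((fun kv : (Int × Int) × Int => pvWeight kv.1.1 kv.1.2 * kv.2) ∘
      (fun k : Int × Int =>
        (k, (List.count k (row.map (fun p => ((p.1.length : Int), (p.2.length : Int)))) : Int))))
      = fun k : Int × Int =>
        pvWeight k.1 k.2 *
          (List.count k (row.map (fun p => ((p.1.length : Int), (p.2.length : Int)))) : Int) := rfl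
  have h2 := sum_ofList_count
      (row.map (fun p => ((p.1.length : Int), (p.2.length : Int))))
      (fun k : Int × Int => pvWeight k.1 k.2)
  rw [h3, h2, List.map_map]
  rfl

-- ===== VERDICT =====
theorem check_connection_spec : Claim_equal_check_connection := by
  intro player cl _hdom hpre
  unfold Spec_check_connection check_connection check_connection_alt Pre_check_connection at *
  by_cases hp : player = 0
  · subst hp
    have hlen : 1 ≤ cl.length := by simpa using hpre
    rcases cl with _ | ⟨row, rest⟩
    · simp at hlen
    · simp only [beq_self_eq_true, if_true, PySem.List.pyGet?_zero_cons]
      have hA : row.foldl (fun score p =>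
          let connected_pair := p.1
          let opened := p.2
          if opened.length == 0 && decide (connected_pair.length < 5) then score
          else if connected_pair.length == 2 then (if opened.length == 2 then score + 20 else score + 5)
          else if connected_pair.length == 3 then (if opened.length == 2 then score + 100 else score + 10)
          else if connected_pair.length == 4 then (if opened.length == 2 then score + 7777 else score + 50)
          else if connected_pair.length == 5 then score + 999999999
          else score) 0
        = row.foldl (fun s p => s + pvItemW p) 0 := by
        apply PySem.List.foldl_congr_mem _ _ _ _ ?_
        intro s p _
        exact stepA_black s p
      rw [hA, PySem.List.foldl_add (g := pvItemW), alt_row]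
      simp
  · have hb : (player == 0) = false := by simp [hp]
    have hlen : 2 ≤ cl.length := by simpa [hp] using hpre
    rcases cl with _ | ⟨x, _ | ⟨y, rest⟩⟩
    · simp at hlen
    · simp at hlen
    · have h1 : PySem.List.pyGet? (x :: y :: rest) 1 = some y := by
        simp [PySem.List.pyGet?, PySem.List.pyIdx?]
      simp only [hb, Bool.false_eq_true, if_false, h1]
      have hA : y.foldl (fun score p =>
          let connected_pair := p.1
          let opened := p.2
          if opened.length == 0 && decide (connected_pair.length < 5) then score
          else if connected_pair.length == 2 then (if opened.length == 2 then score - 20 else score - 5)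
          else if connected_pair.length == 3 then (if opened.length == 2 then score - 100 else score - 10)
          else if connected_pair.length == 4 then (if opened.length == 2 then score - 7777 else score - 50)
          else if connected_pair.length == 5 then score - 999999999
          else score) 0
        = y.foldl (fun s p => s + (-pvItemW p)) 0 := by
        apply PySem.List.foldl_congr_mem _ _ _ _ ?_
        intro s p _
        exact stepA_white s p
      rw [hA, PySem.List.foldl_add (g := fun p => -pvItemW p), alt_row]
      have hsum : ∀ l : List (List Int × List Int),
          (l.map fun p => -pvItemW p).sum = -(l.map pvItemW).sum := by
        intro l
        induction l with
        | nil => simp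
        | cons h t ih => simp [ih]; ring
      rw [hsum]
      ring
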